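-- pv_equiv track=rewrite | github.com/thomas-mauran/lottery-prediction | lottery_predictor.py | evaluate_prediction
-- ===== SOURCE A (Python) =====
-- def evaluate_prediction(prediction, actual_numbers):
--     """Evaluate a single prediction against actual numbers"""
--     prediction_set = set(prediction)
--     actual_set = set(actual_numbers)
--
--     matches = len(prediction_set.intersection(actual_set))
--     return {
--         'matches': matches,
--         'sum_diff': abs(sum(prediction) - sum(actual_numbers)),
--         'numbers_within_5': sum(1 for p in prediction if any(abs(p - a) <= 5 for a in actual_numbers))
--     }
-- ===== SOURCE B (Python) =====
-- def bisect_left(a, x):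
--     lo = 0
--     hi = len(a)
--     while lo < hi:
--         mid = (lo + hi) // 2
--         if a[mid] < x:
--             lo = mid + 1
--         else:
--             hi = mid
--     return lo
--
--
-- def evaluate_prediction(prediction, actual_numbers):
--     """Evaluate a single prediction against actual numbers (sorted-index version)"""
--     sorted_actual = sorted(actual_numbers)
--     n = len(sorted_actual)
--     pred_sum = 0
--     within = 0
--     matches = 0
--     seen = set()
--     for p in prediction:
--         pred_sum += p
--         i = bisect_left(sorted_actual, p - 5)
--         if i < n and sorted_actual[i] <= p + 5:
--             within += 1
--         if p not in seen:
--             seen.add(p)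
--             j = bisect_left(sorted_actual, p)
--             if j < n and sorted_actual[j] == p:
--                 matches += 1
--     return {
--         'matches': matches,
--         'sum_diff': abs(pred_sum - sum(sorted_actual)),
--         'numbers_within_5': within,
--     }
-- ===== Notes on version B (the rewrite author's own statement) =====
-- stated objective: faster
-- what changed: Replaces the per-prediction linear scan of actual_numbers (and the set intersection) with one sorted copy of actual_numbers queried by binary search, in a single pass over prediction that also accumulates the sum and first-occurrence matches via a seen-set.
import Mathlib
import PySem

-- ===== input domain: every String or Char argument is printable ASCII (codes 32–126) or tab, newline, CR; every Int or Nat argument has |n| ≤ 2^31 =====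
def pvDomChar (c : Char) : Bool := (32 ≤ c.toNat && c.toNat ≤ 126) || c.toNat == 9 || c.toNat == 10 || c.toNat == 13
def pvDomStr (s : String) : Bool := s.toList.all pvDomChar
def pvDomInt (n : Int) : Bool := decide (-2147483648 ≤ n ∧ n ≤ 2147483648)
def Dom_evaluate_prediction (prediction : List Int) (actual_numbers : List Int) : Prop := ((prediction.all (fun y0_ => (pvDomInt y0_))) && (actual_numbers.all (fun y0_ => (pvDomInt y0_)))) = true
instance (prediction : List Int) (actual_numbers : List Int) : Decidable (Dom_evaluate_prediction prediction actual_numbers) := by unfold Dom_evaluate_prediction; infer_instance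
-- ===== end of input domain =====

-- B replaces A's per-prediction linear scan (and the set intersection) by one sorted copy of
-- actual_numbers queried with binary search in a single pass over prediction (objective: faster).

-- ===== PORT A =====
def evaluate_prediction (prediction : List Int) (actual_numbers : List Int) : List (String × Int) :=
  let prediction_set := PySem.Set.ofList prediction
  let actual_set := PySem.Set.ofList actual_numbers
  let matches_ := PySem.Set.len (PySem.Set.inter prediction_set actual_set)
  [("matches", matches_),
   ("sum_diff", |prediction.sum - actual_numbers.sum|),
   -- sum(1 for p in prediction if any(abs(p - a) <= 5 for a in actual_numbers))
   ("numbers_within_5",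
     (prediction.countP (fun p => actual_numbers.any (fun a => decide (|p - a| ≤ 5))) : Int))]

-- ===== PORT B =====
-- the body of Source B's 'for p in prediction' loop; state = (pred_sum, within, matches, seen)
def evalStep (sa : List Int) (n : Nat) (st : Int × Int × Int × PySem.Set Int) (p : Int) :
    Int × Int × Int × PySem.Set Int :=
  let psum := st.1 + p
  let i := PySem.List.bisectLeft sa (p - 5)
  let within := if i < n ∧ sa.getD i 0 ≤ p + 5 then st.2.1 + 1 else st.2.1
  if st.2.2.2.contains p then (psum, within, st.2.2.1, st.2.2.2)
  else
    let j := PySem.List.bisectLeft sa p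
    let matches_ := if j < n ∧ sa.getD j 0 = p then st.2.2.1 + 1 else st.2.2.1
    (psum, within, matches_, st.2.2.2.add p)

def evaluate_prediction_alt (prediction : List Int) (actual_numbers : List Int) : List (String × Int) :=
  let sa := PySem.List.sorted actual_numbers (fun x => x)
  let n := sa.length
  let st := prediction.foldl (evalStep sa n) (0, 0, 0, PySem.Set.empty)
  [("matches", st.2.2.1),
   ("sum_diff", |st.1 - sa.sum|),
   ("numbers_within_5", st.2.1)]

-- ===== PRECONDITION & SPEC =====
def Spec_evaluate_prediction (prediction : List Int) (actual_numbers : List Int) (out : List (String × Int)) : Prop := out = evaluate_prediction_alt prediction actual_numbers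
instance (prediction : List Int) (actual_numbers : List Int) (out : List (String × Int)) : Decidable (Spec_evaluate_prediction prediction actual_numbers out) := by unfold Spec_evaluate_prediction; infer_instance

-- ===== CLAIM (what is proved, stated in full; the proofs are below) =====
def Claim_equal_evaluate_prediction : Prop := ∀ (prediction : List Int) (actual_numbers : List Int), Dom_evaluate_prediction prediction actual_numbers → Spec_evaluate_prediction prediction actual_numbers (evaluate_prediction prediction actual_numbers)

-- ===== LEMMAS AND PROOFS =====

-- reference count of B's "first occurrence and member" loop
def bMatches (M : Int → Bool) : PySem.Set Int → List Int → Int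
  | _, [] => 0
  | seen, p :: l =>
    if seen.contains p then bMatches M seen l
    else (if M p then 1 else 0) + bMatches M (seen.add p) l

lemma pairwise_getD_mono (sa : List Int) (hs : sa.Pairwise (· ≤ ·))
    {i j : Nat} (hij : i ≤ j) (hj : j < sa.length) : sa.getD i 0 ≤ sa.getD j 0 := by
  rcases Nat.lt_or_ge i j with h | h
  · have := (List.pairwise_iff_getElem.mp hs) i j (lt_trans h hj) hj h
    simpa [List.getD_eq_getElem, lt_trans h hj, hj] using this
  · have : i = j := le_antisymm hij h
    simp [this]

lemma bisect_mem_iff (sa : List Int) (hs : sa.Pairwise (· ≤ ·)) (p : Int) :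
    (PySem.List.bisectLeft sa p < sa.length ∧ sa.getD (PySem.List.bisectLeft sa p) 0 = p)
      ↔ p ∈ sa := by
  obtain ⟨hle, hlt, hge⟩ := PySem.List.bisectLeft_spec sa p hs
  set r := PySem.List.bisectLeft sa p with hr
  constructor
  · rintro ⟨hrn, hval⟩
    have : sa.getD r 0 ∈ sa := by
      rw [List.getD_eq_getElem sa 0 hrn]; exact List.getElem_mem hrn
    rwa [hval] at this
  · intro hp
    obtain ⟨k, hk, hkv⟩ := List.mem_iff_getElem.mp hp
    have hrk : r ≤ k := by
      by_contra hc
      have := hlt k hk (Nat.lt_of_not_le hc)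
      omega
    have hrn : r < sa.length := lt_of_le_of_lt hrk hk
    refine ⟨hrn, le_antisymm ?_ ?_⟩
    · have := pairwise_getD_mono sa hs hrk hk
      rwa [List.getD_eq_getElem sa 0 hk, hkv] at this
    · have := hge r hrn le_rfl
      rw [List.getD_eq_getElem sa 0 hrn]; exact this

lemma bisect_window_iff (sa : List Int) (hs : sa.Pairwise (· ≤ ·)) (p : Int) :
    (PySem.List.bisectLeft sa (p - 5) < sa.length ∧ sa.getD (PySem.List.bisectLeft sa (p - 5)) 0 ≤ p + 5)
      ↔ ∃ a ∈ sa, p - 5 ≤ a ∧ a ≤ p + 5 := by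
  obtain ⟨hle, hlt, hge⟩ := PySem.List.bisectLeft_spec sa (p - 5) hs
  set r := PySem.List.bisectLeft sa (p - 5) with hr
  constructor
  · rintro ⟨hrn, hub⟩
    refine ⟨sa.getD r 0, ?_, ?_, hub⟩
    · rw [List.getD_eq_getElem sa 0 hrn]; exact List.getElem_mem hrn
    · have := hge r hrn le_rfl
      rw [List.getD_eq_getElem sa 0 hrn]; exact this
  · rintro ⟨a, ha, hlb, hub⟩
    obtain ⟨k, hk, hkv⟩ := List.mem_iff_getElem.mp ha
    have hrk : r ≤ k := by
      by_contra hc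
      have := hlt k hk (Nat.lt_of_not_le hc)
      omega
    have hrn : r < sa.length := lt_of_le_of_lt hrk hk
    refine ⟨hrn, ?_⟩
    have := pairwise_getD_mono sa hs hrk hk
    rw [List.getD_eq_getElem sa 0 hk, hkv] at this
    omega

lemma fold_char (sa : List Int) (l : List Int) (s w m : Int) (seen : PySem.Set Int) :
    l.foldl (evalStep sa sa.length) (s, w, m, seen) =
      (s + l.sum,
       w + (l.countP (fun p => decide (PySem.List.bisectLeft sa (p - 5) < sa.length ∧
              sa.getD (PySem.List.bisectLeft sa (p - 5)) 0 ≤ p + 5)) : Int),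
       m + bMatches (fun p => decide (PySem.List.bisectLeft sa p < sa.length ∧
              sa.getD (PySem.List.bisectLeft sa p) 0 = p)) seen l,
       PySem.Set.update seen l) := by
  induction l generalizing s w m seen with
  | nil => simp only [List.foldl_nil, List.sum_nil, List.countP_nil, bMatches,
      PySem.Set.update, Nat.cast_zero, add_zero]
  | cons p l ih =>
    rw [List.foldl_cons]
    by_cases hc : seen.contains p = true
    · have hadd : seen.add p = seen := by unfold PySem.Set.add; rw [if_pos hc]
      simp only [evalStep, hc, if_true]
      rw [ih]
      by_cases hw : (PySem.List.bisectLeft sa (p - 5) < sa.length ∧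
          sa.getD (PySem.List.bisectLeft sa (p - 5)) 0 ≤ p + 5)
      all_goals
        simp only [hw, if_true, if_false, List.sum_cons, List.countP_cons, bMatches, hc,
          PySem.Set.update, List.foldl_cons, hadd, Prod.mk.injEq, decide_eq_true_eq, and_true]
      all_goals push_cast
      all_goals omega
    · have hadd : seen.add p = seen ++ [p] := by unfold PySem.Set.add; rw [if_neg hc]
      simp only [evalStep, hc, if_false, Bool.false_eq_true]
      rw [ih]
      by_cases hw : (PySem.List.bisectLeft sa (p - 5) < sa.length ∧
          sa.getD (PySem.List.bisectLeft sa (p - 5)) 0 ≤ p + 5)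
      all_goals by_cases hm : (PySem.List.bisectLeft sa p < sa.length ∧
          sa.getD (PySem.List.bisectLeft sa p) 0 = p)
      all_goals
        simp only [hw, hm, if_true, if_false, List.sum_cons, List.countP_cons, bMatches, hc,
          PySem.Set.update, List.foldl_cons, Prod.mk.injEq, decide_eq_true_eq, and_true]
      all_goals push_cast
      all_goals omega

lemma bMatches_eq_filter_length (M : Int → Bool) (l : List Int) (seen : PySem.Set Int) :
    bMatches M seen l =
      (((PySem.Set.update seen l).filter M).length : Int) - ((seen.filter M).length : Int) := by
  induction l generalizing seen with
  | nil => simp [bMatches, PySem.Set.update]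
  | cons p l ih =>
    by_cases hc : seen.contains p = true
    · have hadd : seen.add p = seen := by unfold PySem.Set.add; rw [if_pos hc]
      simp only [bMatches, hc, if_true, PySem.Set.update, List.foldl_cons, hadd, ih]
    · have hadd : seen.add p = seen ++ [p] := by unfold PySem.Set.add; rw [if_neg hc]
      have hlen : ((seen ++ [p]).filter M).length
          = (seen.filter M).length + (if M p then 1 else 0) := by
        rw [List.filter_append, List.length_append]
        by_cases hM : M p = true
        · simp [List.filter, hM]
        · simp [List.filter, hM]
      have hih := ih (seen ++ [p])
      unfold PySem.Set.update at hih ⊢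
      rw [List.foldl_cons, hadd]
      simp only [bMatches, hc, if_false, Bool.false_eq_true]
      rw [hadd, hih, hlen]
      by_cases hM : M p = true
      · rw [if_pos hM, if_pos hM]; push_cast; omega
      · rw [if_neg hM, if_neg hM]; push_cast; omega

-- ===== VERDICT (by name: the statement is the Claim_ definition above) =====
theorem evaluate_prediction_spec : Claim_equal_evaluate_prediction := by
  intro prediction actual_numbers _
  unfold Spec_evaluate_prediction
  simp only [evaluate_prediction, evaluate_prediction_alt]
  set sa := PySem.List.sorted actual_numbers (fun x => x) with hsa
  have hperm : sa.Perm actual_numbers := PySem.List.sorted_perm actual_numbers (fun x => x) false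
  have hs : sa.Pairwise (· ≤ ·) := PySem.List.sorted_pairwise actual_numbers (fun x => x)
  rw [fold_char]
  simp only [List.cons.injEq, Prod.mk.injEq, and_true, true_and]
  refine ⟨?_, ?_, ?_⟩
  · -- matches
    rw [bMatches_eq_filter_length]
    have hupd : PySem.Set.update (PySem.Set.empty (α := Int)) prediction
        = PySem.Set.ofList prediction := rfl
    rw [hupd]
    have hfil : (PySem.Set.ofList prediction).filter
          (fun p => decide (PySem.List.bisectLeft sa p < sa.length ∧
              sa.getD (PySem.List.bisectLeft sa p) 0 = p))
        = (PySem.Set.ofList prediction).filter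
          (fun p => (PySem.Set.ofList actual_numbers).contains p) := by
      apply List.filter_congr
      intro p _
      have h1 := bisect_mem_iff sa hs p
      have h2 : p ∈ sa ↔ p ∈ actual_numbers := hperm.mem_iff
      have h3 : (PySem.Set.ofList actual_numbers).contains p = true ↔ p ∈ actual_numbers := by
        simp [PySem.Set.contains, PySem.Set.mem_ofList]
      by_cases hp : p ∈ actual_numbers
      · rw [decide_eq_true (h1.mpr (h2.mpr hp)), h3.mpr hp]
      · have hcf : (PySem.Set.ofList actual_numbers).contains p = false :=
          Bool.eq_false_iff.mpr (fun h => hp (h3.mp h))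
        rw [decide_eq_false (fun h => hp (h2.mp (h1.mp h))), hcf]
    rw [hfil]
    simp [PySem.Set.len, PySem.Set.inter, PySem.Set.empty]
  · -- sum_diff
    congr 1
    rw [hperm.sum_eq]
    ring
  · -- numbers_within_5
    rw [zero_add]
    congr 1
    apply List.countP_congr
    intro p _
    have h1 := bisect_window_iff sa hs p
    have h2 : (actual_numbers.any (fun a => decide (|p - a| ≤ 5)) = true)
        ↔ (∃ a ∈ sa, p - 5 ≤ a ∧ a ≤ p + 5) := by
      rw [List.any_eq_true]
      constructor
      · rintro ⟨a, ha, h3⟩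
        have : |p - a| ≤ 5 := by simpa using h3
        rw [abs_le] at this
        exact ⟨a, hperm.mem_iff.mpr ha, by omega, by omega⟩
      · rintro ⟨a, ha, h3, h4⟩
        refine ⟨a, hperm.mem_iff.mp ha, ?_⟩
        simp only [decide_eq_true_eq, abs_le]
        omega
    rw [h2, ← h1]
    simp
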